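-- pv_equiv track=rewrite | github.com/spratapsi/Advent-of-Code-2019 | day4_alt.py | next_larger
-- ===== SOURCE A (Python) =====
-- def next_larger(string):
--     l = []
--     prev = '1'
--     s = iter(string)
--     for c in s:
--         if c >= prev:
--             l.append(c)
--             prev = c
--         else:
--             l.append(prev)
--             l.extend(prev for _ in s)
--     return l
-- ===== SOURCE B (Python) =====
-- def next_larger(string):
--     prev = '1'
--     for i, c in enumerate(string):
--         if c < prev:
--             return list(string[:i]) + [prev] * (len(string) - i)
--         prev = c
--     return list(string)
-- ===== Notes on version B (the rewrite author's own statement) =====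
-- stated objective: simpler
-- what changed: Instead of appending char by char and draining the iterator with a generator on descent, B locates the first descent index and builds the result as prefix slice + list-multiplied constant tail, with an early return.
import Mathlib
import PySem

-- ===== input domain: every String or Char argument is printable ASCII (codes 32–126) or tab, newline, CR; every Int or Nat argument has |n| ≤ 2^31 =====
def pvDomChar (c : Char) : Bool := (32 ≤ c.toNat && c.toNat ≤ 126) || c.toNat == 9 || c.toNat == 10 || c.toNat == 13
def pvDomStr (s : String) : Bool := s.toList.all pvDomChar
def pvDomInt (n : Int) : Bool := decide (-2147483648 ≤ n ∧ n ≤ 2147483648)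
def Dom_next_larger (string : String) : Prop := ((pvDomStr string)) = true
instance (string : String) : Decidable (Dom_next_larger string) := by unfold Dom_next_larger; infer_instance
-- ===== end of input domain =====

-- B replaces A's append/drain-iterator loop by finding the first descent index and
-- returning prefix slice + constant tail (simpler decomposition, same O(n) cost).


-- ===== PORT A =====
-- A's loop: append c (prev := c) while c ≥ prev; on first descent append prev and
-- drain the rest of the iterator appending prev each time.
def nlGoA (prev : Char) (l : List String) (cs : List Char) : List String :=
  match cs with
  | [] => l
  | c :: rest =>
    if prev ≤ c then nlGoA c (l ++ [Char.toString c]) rest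
    else (l ++ [Char.toString prev]) ++ rest.map (fun _ => Char.toString prev)

def next_larger (string : String) : List String :=
  nlGoA '1' [] string.toList

-- ===== PORT B =====
-- enumerate-loop: first index i (and the prev there) with string[i] < prev.
def nlFindB (prev : Char) (i : Nat) (cs : List Char) : Option (Nat × Char) :=
  match cs with
  | [] => none
  | c :: rest => if c < prev then some (i, prev) else nlFindB c (i + 1) rest

def next_larger_alt (string : String) : List String :=
  let cs := string.toList
  match nlFindB '1' 0 cs with
  | none => cs.map Char.toString
  | some (i, p) => (cs.take i).map Char.toString ++ List.replicate (cs.length - i) (Char.toString p)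

-- ===== PRECONDITION & SPEC =====
def Spec_next_larger (string : String) (out : List String) : Prop := out = next_larger_alt string
instance (string : String) (out : List String) : Decidable (Spec_next_larger string out) := by unfold Spec_next_larger; infer_instance

-- ===== CLAIM (what is proved, stated in full; the proofs are below) =====
def Claim_equal_next_larger : Prop := ∀ (string : String), Dom_next_larger string → Spec_next_larger string (next_larger string)

-- ===== LEMMAS AND PROOFS =====

theorem nlFindB_shift (cs : List Char) : ∀ (prev : Char) (i : Nat),
    nlFindB prev i cs = (nlFindB prev 0 cs).map (fun jp => (jp.1 + i, jp.2)) := by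
  induction cs with
  | nil => intro prev i; simp [nlFindB]
  | cons c rest ih =>
    intro prev i
    simp only [nlFindB]
    split
    · simp
    · rw [ih c (i + 1), ih c 1, Option.map_map]
      rcases nlFindB c 0 rest with _ | ⟨j, q⟩
      · simp
      · simp; omega

theorem nlGoA_key (cs : List Char) : ∀ (prev : Char) (acc : List String),
    nlGoA prev acc cs = acc ++
      (match nlFindB prev 0 cs with
       | none => cs.map Char.toString
       | some (j, p) => (cs.take j).map Char.toString ++
            List.replicate (cs.length - j) (Char.toString p)) := by
  induction cs with
  | nil => intro prev acc; simp [nlGoA, nlFindB]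
  | cons c rest ih =>
    intro prev acc
    simp only [nlGoA, nlFindB]
    by_cases h : c < prev
    · rw [if_neg (not_le.mpr h), if_pos h]
      simp [List.map_const', List.replicate_succ]
    · rw [if_pos (not_lt.mp h), if_neg h]
      rw [ih c (acc ++ [Char.toString c]), nlFindB_shift rest c 1]
      rcases nlFindB c 0 rest with _ | ⟨j, q⟩
      · simp
      · simp [List.take_succ_cons]

-- ===== VERDICT (by name: the statement is the Claim_ definition above) =====
theorem next_larger_spec : Claim_equal_next_larger := by
  intro s _
  unfold Spec_next_larger next_larger next_larger_alt
  rw [nlGoA_key s.toList '1' []]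
  simp
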